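-- pv_equiv track=rewrite | github.com/johnmarriott/advent-of-code-2023 | year2023/day13/2.py | has_smudged_reflection
-- ===== SOURCE A (Python) =====
-- def has_smudged_reflection(first, second):
--     """
--     is the pairwise xor of the elements of this list all zeroes with exactly one power of two?
--
--     [1, 10, 2] x [2, 2, 1, 4] has a smudged reflection because the pairwise
--     differences (from the x out) are [0, 10, 0] which could be that one side
--     has #.#. = 10 and the other has ..#. = 2 which can be fixed
--
--     [1, 10, 1] x [2, 2, 1, 4] does not since the differences are [1, 8, 0] and
--     we would have to fix two smudges
--     """
--     min_length = min(len(first), len(second))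
--     first.reverse() # reverse in place for comparison
--     differences = [first[i] ^ second[i] for i in range(min_length)]
--
--     n_differences_nonzero = sum([1 if x != 0 else 0 for x in differences])
--     if n_differences_nonzero != 1:
--         return False
--     else:
--         nonzero_difference = sum(differences) # all the rest are zero
--
--         # int.bit_count() will "Return the number of ones in the binary representation
--         # of the absolute value of the integer"
--         # and a power of two has exactly one one in its binary representation
--         return nonzero_difference.bit_count() == 1
-- ===== SOURCE B (Python) =====
-- def has_smudged_reflection(first, second):
--     # Single reduction: total number of set bits across all pairwise xors is 1
--     # exactly when there is one nonzero difference and it is a power of two.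
--     # (Same in-place reversal side effect as the original.)
--     first.reverse()
--     total = 0
--     for a, b in zip(first, second):
--         total += abs(a ^ b).bit_count()
--     return total == 1
-- ===== Notes on version B (the rewrite author's own statement) =====
-- stated objective: simpler
-- what changed: Replaces the two-phase logic (build a difference list, count nonzeros, then separately sum and power-of-two-test) with one pass over zip(first, second) accumulating a single running total of bit-counts; total == 1 is equivalent because each nonzero xor contributes at least one set bit.
import Mathlib
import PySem

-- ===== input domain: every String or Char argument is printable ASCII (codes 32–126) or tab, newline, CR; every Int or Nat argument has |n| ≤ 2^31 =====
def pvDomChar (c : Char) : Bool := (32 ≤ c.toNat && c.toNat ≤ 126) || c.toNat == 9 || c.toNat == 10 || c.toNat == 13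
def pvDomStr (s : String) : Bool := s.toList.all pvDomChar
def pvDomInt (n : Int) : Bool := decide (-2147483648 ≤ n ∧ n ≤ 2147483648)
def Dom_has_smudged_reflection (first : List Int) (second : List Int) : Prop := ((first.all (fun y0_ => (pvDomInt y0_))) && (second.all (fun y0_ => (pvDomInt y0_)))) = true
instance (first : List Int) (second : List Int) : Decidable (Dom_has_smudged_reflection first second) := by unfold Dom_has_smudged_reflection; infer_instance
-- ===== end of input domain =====

-- B replaces A's two-phase logic (difference list, nonzero count, then power-of-two test of the sum)
-- with one pass over zip(first, second) accumulating a single running bit-count total; objective: simpler.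
-- A reverses `first` in place; B performs the same mutation, and the equivalence proved is about the return value.


-- ===== PORT A =====
-- Literal transliteration of A: build the difference list over range(min_length)
-- (indices are always in range, so pyGetD's default is never used), count the
-- nonzero differences with a 0/1 sum, then test the bit count of the total sum.
def has_smudged_reflection (first : List Int) (second : List Int) : Bool :=
  let min_length : Int := min (PySem.List.len first) (PySem.List.len second)
  let first := first.reverse
  let differences : List Int :=
    (PySem.List.pyRange 0 min_length 1).map
      (fun i => PySem.Int.bxor (PySem.List.pyGetD first i 0) (PySem.List.pyGetD second i 0))
  let n_differences_nonzero : Int :=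
    (differences.map (fun x => if x ≠ 0 then (1 : Int) else 0)).sum
  if n_differences_nonzero ≠ 1 then
    false
  else
    let nonzero_difference : Int := differences.sum
    PySem.Int.bitCount nonzero_difference == 1

-- ===== PORT B =====
-- Literal transliteration of B: one fold over zip(first.reverse, second)
-- accumulating abs(a ^ b).bit_count(); return total == 1.
def has_smudged_reflection_alt (first : List Int) (second : List Int) : Bool :=
  let first := first.reverse
  let total : Int :=
    (first.zip second).foldl
      (fun acc p => acc + (PySem.Int.bitCount |PySem.Int.bxor p.1 p.2| : Int)) 0
  total == 1

-- ===== PRECONDITION & SPEC =====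
def Spec_has_smudged_reflection (first : List Int) (second : List Int) (out : Bool) : Prop := out = has_smudged_reflection_alt first second
instance (first : List Int) (second : List Int) (out : Bool) : Decidable (Spec_has_smudged_reflection first second out) := by unfold Spec_has_smudged_reflection; infer_instance

-- ===== CLAIM (what is proved, stated in full; the proofs are below) =====
def Claim_equal_has_smudged_reflection : Prop := ∀ (first : List Int) (second : List Int), Dom_has_smudged_reflection first second → Spec_has_smudged_reflection first second (has_smudged_reflection first second)

-- ===== LEMMAS AND PROOFS =====


-- a nonzero integer has at least one set bit
lemma bitCount_pos_of_ne_zero (d : Int) (hd : d ≠ 0) : 1 ≤ PySem.Int.bitCount d := by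
  have habs : PySem.Int.bitCount d = PySem.Int.bitCount (d.natAbs : Int) := by
    simp [PySem.Int.bitCount, Int.natAbs_abs]
  rw [habs]
  have hm : 0 < d.natAbs := by omega
  generalize d.natAbs = m at hm ⊢
  induction m using Nat.strong_induction_on with
  | _ m ih =>
    rw [PySem.Int.bitCount_natCast hm]
    rcases Nat.mod_two_eq_zero_or_one m with h | h
    · have h2 : 0 < m / 2 := by omega
      have := ih (m / 2) (by omega) h2
      omega
    · omega

-- bit_count reads the absolute value
lemma bitCount_abs (d : Int) : PySem.Int.bitCount |d| = PySem.Int.bitCount d := by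
  rcases abs_choice d with h | h
  · rw [h]
  · rw [h, PySem.Int.bitCount_neg]

-- map over zip is zipWith
lemma zip_map_eq_zipWith (f : Int → Int → Int) (xs ys : List Int) :
    (xs.zip ys).map (fun p => f p.1 p.2) = List.zipWith f xs ys := by
  induction xs generalizing ys with
  | nil => simp
  | cons x xs ih => cases ys <;> simp [ih]

-- indexed map over range(min length) is zipWith
lemma range_getD_zipWith (f : Int → Int → Int) (xs ys : List Int) :
    (List.range (min xs.length ys.length)).map (fun k => f (xs.getD k 0) (ys.getD k 0))
    = List.zipWith f xs ys := by
  induction xs generalizing ys with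
  | nil => simp
  | cons x xs ih =>
    cases ys with
    | nil => simp
    | cons y ys =>
      simp only [List.length_cons, Nat.succ_min_succ, List.range_succ_eq_map, List.map_cons,
        List.map_map, List.zipWith_cons_cons]
      refine congrArg _ ?_
      rw [← ih ys]
      rfl

-- A's indexed comprehension over range(min_length) is zipWith
lemma diffs_eq_zipWith (f : Int → Int → Int) (xs ys : List Int) :
    (PySem.List.pyRange 0 (min (PySem.List.len xs) (PySem.List.len ys)) 1).map
      (fun i => f (PySem.List.pyGetD xs i 0) (PySem.List.pyGetD ys i 0))
    = List.zipWith f xs ys := by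
  have hmin : min (PySem.List.len xs) (PySem.List.len ys)
      = ((min xs.length ys.length : Nat) : Int) := by
    simp [PySem.List.len]
  rw [hmin, PySem.List.pyRange_one, List.map_map]
  have hcg : ∀ k ∈ List.range ((((min xs.length ys.length : Nat) : Int) - 0).toNat),
      f (PySem.List.pyGetD xs ((0 : Int) + k) 0) (PySem.List.pyGetD ys ((0 : Int) + k) 0)
      = f (xs.getD k 0) (ys.getD k 0) := by
    intro k hk
    simp [PySem.List.pyGetD_natCast]
  rw [List.map_congr_left (by intro k hk; exact hcg k (by simpa using hk))]
  have ht : (((min xs.length ys.length : Nat) : Int) - 0).toNat = min xs.length ys.length := by omega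
  rw [ht, range_getD_zipWith]

lemma all_zero_sums (L : List Int) (h : L.countP (fun x => decide (x ≠ 0)) = 0) :
    L.sum = 0 ∧ (L.map (fun d => PySem.Int.bitCount d)).sum = 0 := by
  rw [List.countP_eq_zero] at h
  have h' : ∀ x ∈ L, x = 0 := by
    intro x hx; have := h x hx; simpa using this
  constructor
  · exact List.sum_eq_zero h'
  · refine List.sum_eq_zero ?_
    intro x hx
    obtain ⟨d, hd, rfl⟩ := List.mem_map.mp hx
    rw [h' d hd]; decide

lemma one_nonzero_sums (L : List Int) (h : L.countP (fun x => decide (x ≠ 0)) = 1) :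
    ∃ d : Int, d ≠ 0 ∧ L.sum = d ∧
      (L.map (fun d => PySem.Int.bitCount d)).sum = PySem.Int.bitCount d := by
  induction L with
  | nil => simp at h
  | cons x L ih =>
    rw [List.countP_cons] at h
    by_cases hx : x = 0
    · rw [if_neg (by simp [hx]), Nat.add_zero] at h
      obtain ⟨d, hd, hs, hb⟩ := ih h
      refine ⟨d, hd, ?_, ?_⟩
      · rw [List.sum_cons, hs, hx, zero_add]
      · rw [List.map_cons, List.sum_cons, hb, hx, PySem.Int.bitCount_zero, Nat.zero_add]
    · rw [if_pos (by simp [hx])] at h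
      have h0 : L.countP (fun x => decide (x ≠ 0)) = 0 := by omega
      obtain ⟨hs, hb⟩ := all_zero_sums L h0
      refine ⟨x, hx, ?_, ?_⟩
      · rw [List.sum_cons, hs, add_zero]
      · rw [List.map_cons, List.sum_cons, hb, Nat.add_zero]

lemma countP_le_bitCount_sum (L : List Int) :
    L.countP (fun x => decide (x ≠ 0)) ≤ (L.map (fun d => PySem.Int.bitCount d)).sum := by
  induction L with
  | nil => simp
  | cons x L ih =>
    rw [List.countP_cons, List.map_cons, List.sum_cons]
    by_cases hx : x = 0
    · rw [if_neg (by simp [hx])]; omega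
    · rw [if_pos (by simp [hx])]
      have := bitCount_pos_of_ne_zero x hx
      omega

lemma core (L : List Int) :
    (if (L.map (fun x => if x ≠ 0 then (1 : Int) else 0)).sum ≠ 1 then false
     else (PySem.Int.bitCount L.sum == 1))
    = (((L.map (fun d => (PySem.Int.bitCount d : Int))).sum) == 1) := by
  have hcnt : (L.map (fun x => if x ≠ 0 then (1 : Int) else 0)).sum
      = (L.countP (fun x => decide (x ≠ 0)) : Int) := by
    induction L with
    | nil => simp
    | cons x L ih =>
      rw [List.map_cons, List.sum_cons, List.countP_cons, ih]
      by_cases hx : x = 0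
      · rw [if_neg (by simp [hx]), if_neg (by simp [hx])]; push_cast; ring
      · rw [if_pos hx, if_pos (by simp [hx])]; push_cast; ring
  have hbsum : (L.map (fun d => (PySem.Int.bitCount d : Int))).sum
      = ((L.map (fun d => PySem.Int.bitCount d)).sum : Int) := by
    clear hcnt
    induction L with
    | nil => simp
    | cons x L ih => rw [List.map_cons, List.sum_cons, ih, List.map_cons, List.sum_cons]; push_cast; ring
  rw [hcnt, hbsum]
  rcases Nat.lt_or_ge (L.countP (fun x => decide (x ≠ 0))) 2 with hlt | hge
  · interval_cases h : L.countP (fun x => decide (x ≠ 0))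
    · obtain ⟨_, hb⟩ := all_zero_sums L h
      rw [hb]
      rw [if_pos (by norm_num)]
      norm_num
    · obtain ⟨d, hd, hs, hb⟩ := one_nonzero_sums L h
      rw [hs, hb, if_neg (by norm_num)]
      have : ((PySem.Int.bitCount d : Int) == 1) = (PySem.Int.bitCount d == 1) := by
        rcases eq_or_ne (PySem.Int.bitCount d) 1 with h1 | h1
        · simp [h1]
        · have h1' : (PySem.Int.bitCount d : Int) ≠ 1 := by exact_mod_cast h1
          simp [h1, h1']
      rw [this]
  · have hle := countP_le_bitCount_sum L
    have h2 : (2:Nat) ≤ (L.map (fun d => PySem.Int.bitCount d)).sum := le_trans hge hle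
    have hc : ((L.countP (fun x => decide (x ≠ 0)) : Nat) : Int) ≠ 1 := by
      exact_mod_cast (by omega : L.countP (fun x => decide (x ≠ 0)) ≠ 1)
    rw [if_pos hc]
    have hne : (((L.map (fun d => PySem.Int.bitCount d)).sum : Int)) ≠ 1 := by
      exact_mod_cast (by omega : (L.map (fun d => PySem.Int.bitCount d)).sum ≠ 1)
    exact (beq_eq_false_iff_ne.mpr hne).symm

-- ===== VERDICT (by name: the statement is the Claim_ definition above) =====
theorem has_smudged_reflection_spec : Claim_equal_has_smudged_reflection := by
  intro first second _
  unfold Spec_has_smudged_reflection has_smudged_reflection has_smudged_reflection_alt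
  simp only []
  have hlen : PySem.List.len first = PySem.List.len first.reverse := by
    simp [PySem.List.len]
  rw [hlen, diffs_eq_zipWith PySem.Int.bxor first.reverse second]
  rw [PySem.List.foldl_add (first.reverse.zip second) (fun p => (PySem.Int.bitCount |PySem.Int.bxor p.1 p.2| : Int)) 0]
  rw [zip_map_eq_zipWith (fun a b => (PySem.Int.bitCount |PySem.Int.bxor a b| : Int)) first.reverse second]
  have hz : List.zipWith (fun a b => (PySem.Int.bitCount |PySem.Int.bxor a b| : Int)) first.reverse second
      = (List.zipWith PySem.Int.bxor first.reverse second).map (fun d => (PySem.Int.bitCount d : Int)) := by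
    rw [List.map_zipWith]
    have hfun : (fun a b => (PySem.Int.bitCount |PySem.Int.bxor a b| : Int))
        = (fun a b => (PySem.Int.bitCount (PySem.Int.bxor a b) : Int)) := by
      funext a b; rw [bitCount_abs]
    rw [hfun]
  rw [hz, zero_add]
  exact core (List.zipWith PySem.Int.bxor first.reverse second)
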